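-- pv_equiv track=rewrite | github.com/mvysotskyi/agents-benchmarking | evaluation/objective/circuit/truth_table.py | _column_signature_multiset
-- ===== SOURCE A (Python) =====
-- from collections import Counter
-- from typing import Dict, Iterable
--
-- def _column_signature_multiset(rows: Iterable[tuple[bool, ...]]) -> Counter[str]:
--     rows = list(rows)
--     if not rows:
--         return Counter()
--
--     output_count = len(rows[0])
--     return Counter(
--         "".join("1" if row[col_idx] else "0" for row in rows)
--         for col_idx in range(output_count)
--     )
-- ===== SOURCE B (Python) =====
-- from collections import Counter
--
--
-- def _column_signature_multiset(rows):
--     rows = list(rows)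
--     if not rows:
--         return Counter()
--     accs = [[] for _ in rows[0]]
--     for row in rows:
--         for acc, bit in zip(accs, row):
--             acc.append("1" if bit else "0")
--     return Counter("".join(acc) for acc in accs)
-- ===== Notes on version B (the rewrite author's own statement) =====
-- stated objective: alternative
-- what changed: A re-scans the whole row list once per column (column-major generator per col_idx); B makes a single row-major pass that extends one accumulator per column via zip and counts the joined signatures at the end.
-- outside the precondition, e.g. on _column_signature_multiset([(True, True), (True,)]): A raises IndexError, B returns {'11': 1, '1': 1}
import Mathlib
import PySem

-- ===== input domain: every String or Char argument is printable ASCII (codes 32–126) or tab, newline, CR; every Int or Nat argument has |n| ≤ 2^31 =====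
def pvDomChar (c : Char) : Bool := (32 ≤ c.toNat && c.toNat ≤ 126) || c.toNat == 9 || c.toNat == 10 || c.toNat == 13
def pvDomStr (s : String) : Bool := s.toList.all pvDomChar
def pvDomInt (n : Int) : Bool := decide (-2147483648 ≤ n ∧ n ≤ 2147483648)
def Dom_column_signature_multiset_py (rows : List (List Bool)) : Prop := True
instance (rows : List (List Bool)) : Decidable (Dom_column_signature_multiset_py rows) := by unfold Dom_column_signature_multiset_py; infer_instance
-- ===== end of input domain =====

-- B replaces A's column-major re-reading of all rows per column by one row-major pass that
-- extends per-column accumulators (objective: alternative decomposition, same asymptotic cost).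
-- ===== PORT A =====
-- row[col_idx] is ported as pyGetD row colIdx false; Python raises IndexError there when
-- colIdx is out of range for a ragged shorter row — exactly those inputs are excluded by Pre_.
def column_signature_multiset_py (rows : List (List Bool)) : List (String × Int) :=
  if rows = [] then []
  else
    let output_count : Nat := (rows.headD []).length
    let sigs : List String :=
      (PySem.List.pyRange 0 (output_count : Int) 1).map (fun colIdx =>
        PySem.Str.join "" (rows.map (fun row =>
          if PySem.List.pyGetD row colIdx false then "1" else "0")))
    (PySem.Dict.counter sigs).items

-- ===== PORT B =====
-- one row of B's inner loop: 'for acc, bit in zip(accs, row): acc.append(...)' — the zipped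
-- prefix is extended, accumulators beyond len(row) are left untouched (exact zip semantics)
def pvStep (accs : List (List String)) (row : List Bool) : List (List String) :=
  ((accs.zip row).map (fun p => p.1 ++ [if p.2 then "1" else "0"])) ++ accs.drop row.length

def column_signature_multiset_py_alt (rows : List (List Bool)) : List (String × Int) :=
  match rows with
  | [] => []
  | r0 :: _ =>
    let accs := rows.foldl pvStep (r0.map fun _ => ([] : List String))
    (PySem.Dict.counter (accs.map (fun acc => PySem.Str.join "" acc))).items

-- ===== PRECONDITION & SPEC =====
-- Pre_ excludes exactly the ragged inputs where some row is shorter than the first row: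
-- there Python A raises IndexError (row[col_idx]); on everything A returns, Pre_ holds.
def Pre_column_signature_multiset_py (rows : List (List Bool)) : Prop :=
  rows = [] ∨ ∀ row ∈ rows, (rows.headD []).length ≤ row.length
instance (rows : List (List Bool)) : Decidable (Pre_column_signature_multiset_py rows) := by
  unfold Pre_column_signature_multiset_py; infer_instance

def pvWitness_column_signature_multiset_py : List (List Bool) := [[true, false], [false, true]]

def Spec_column_signature_multiset_py (rows : List (List Bool)) (out : List (String × Int)) : Prop := out = column_signature_multiset_py_alt rows
instance (rows : List (List Bool)) (out : List (String × Int)) : Decidable (Spec_column_signature_multiset_py rows out) := by unfold Spec_column_signature_multiset_py; infer_instance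

-- ===== CLAIM (what is proved, stated in full; the proofs are below) =====
def Claim_equal_column_signature_multiset_py : Prop := ∀ (rows : List (List Bool)), Dom_column_signature_multiset_py rows → Pre_column_signature_multiset_py rows → Spec_column_signature_multiset_py rows (column_signature_multiset_py rows)


-- ===== LEMMAS AND PROOFS =====

-- the fold of B's row steps, read per column: each accumulator gains this column's bit of every row
lemma pvFold_get (rows : List (List Bool)) (accs : List (List String))
    (h : ∀ row ∈ rows, accs.length ≤ row.length) (i : Nat) :
    (rows.foldl pvStep accs)[i]? =
      accs[i]?.map (fun a => a ++ rows.map (fun row => if row.getD i false then "1" else "0")) := by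
  induction rows generalizing accs with
  | nil => simp
  | cons row rows ih =>
    have hlen : accs.length ≤ row.length := h row (by simp)
    have hdrop : accs.drop row.length = [] := List.drop_eq_nil_of_le hlen
    have hstep : (pvStep accs row).length = accs.length := by
      simp [pvStep, hdrop]; omega
    rw [List.foldl_cons, ih _ (by intro r hr; rw [hstep]; exact h r (by simp [hr]))]
    by_cases hi : i < accs.length
    · have hir : i < row.length := lt_of_lt_of_le hi hlen
      have hz : (accs.zip row)[i]? = some (accs[i], row[i]) := by
        rw [List.getElem?_eq_getElem (by simp [List.length_zip]; omega)]
        simp [List.getElem_zip]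
      have h1 : (pvStep accs row)[i]? = some (accs[i] ++ [if row[i] then "1" else "0"]) := by
        simp [pvStep, hdrop, List.getElem?_map, hz]
      have h2 : accs[i]? = some accs[i] := List.getElem?_eq_getElem hi
      simp [h1, h2, List.getElem?_eq_getElem hir]
    · have h1 : (pvStep accs row)[i]? = none := by
        apply List.getElem?_eq_none
        simp [pvStep, hdrop]
        omega
      have h2 : accs[i]? = none := List.getElem?_eq_none (by omega)
      simp [h1, h2]

theorem column_signature_multiset_py_spec_aux (rows : List (List Bool))
    (hpre : Pre_column_signature_multiset_py rows) :
    column_signature_multiset_py rows = column_signature_multiset_py_alt rows := by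
  match rows with
  | [] => rfl
  | r0 :: rest =>
    have hpre' : ∀ row ∈ r0 :: rest, r0.length ≤ row.length := by
      rcases hpre with h | h
      · exact absurd h (by simp)
      · simpa using h
    set rows := r0 :: rest with hrows
    unfold column_signature_multiset_py column_signature_multiset_py_alt
    rw [hrows]
    simp only [reduceCtorEq, if_false, List.headD_cons]
    congr 1
    apply PySem.Dict.ext
    congr 1
    -- it suffices that the two signature lists are equal
    refine congrArg PySem.Dict.counter ?_
    have hrange : PySem.List.pyRange 0 (r0.length : Int) 1 = (List.range r0.length).map Int.ofNat := by
      simpa using PySem.List.pyRange_zero_natCast r0.length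
    rw [hrange, List.map_map]
    apply List.ext_getElem?
    intro i
    have haccs0 : (r0.map fun _ => ([] : List String)).length = r0.length := by simp
    have hfold := pvFold_get rows (r0.map fun _ => ([] : List String))
      (by rw [haccs0]; exact hpre') i
    rw [hrows] at hfold
    rw [List.getElem?_map, List.getElem?_map, hfold]
    by_cases hi : i < r0.length <;>
      simp [hi, PySem.List.pyGetD_natCast]

-- ===== VERDICT (by name: the statement is the Claim_ definition above) =====
theorem column_signature_multiset_py_spec : Claim_equal_column_signature_multiset_py := by
  intro rows _ hpre
  exact column_signature_multiset_py_spec_aux rows hpre
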